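-- pv_equiv track=rewrite | github.com/equinor/datamagic | mylastool.py | curvemnemonics
-- ===== SOURCE A (Python) =====
-- def sectionindex(lines, prefix):
--     """Find index of first line with given prefix."""
--     idx = 0
--     for line in lines:
--         if line.strip().startswith(prefix):
--             break
--         idx += 1
--     return idx
--
-- def curvemnemonics(lines):
--     """Return list of curve mnemonics."""
--     startidx = sectionindex(lines, "~C")
--     endidx = sectionindex(lines[startidx+1:], "~")
--     mnemonics = []
--     for line in lines[startidx+1:startidx+1+endidx]:
--         if line.startswith('#'):
--             continue
--         (mnem, *_) = line.split('.')
--         mnemonics.append(mnem.strip())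
--     return mnemonics
-- ===== SOURCE B (Python) =====
-- def curvemnemonics(lines):
--     """Return list of curve mnemonics."""
--     mnemonics = []
--     in_section = False
--     for line in lines:
--         if not in_section:
--             if line.strip().startswith("~C"):
--                 in_section = True
--             continue
--         if line.strip().startswith("~"):
--             break
--         if line.startswith('#'):
--             continue
--         mnemonics.append(line.split('.')[0].strip())
--     return mnemonics
-- ===== Notes on version B (the rewrite author's own statement) =====
-- stated objective: simpler
-- what changed: Replaced the two sectionindex scans plus list slicing with a single pass over the lines using an in_section flag that collects mnemonics directly.
import Mathlib
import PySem

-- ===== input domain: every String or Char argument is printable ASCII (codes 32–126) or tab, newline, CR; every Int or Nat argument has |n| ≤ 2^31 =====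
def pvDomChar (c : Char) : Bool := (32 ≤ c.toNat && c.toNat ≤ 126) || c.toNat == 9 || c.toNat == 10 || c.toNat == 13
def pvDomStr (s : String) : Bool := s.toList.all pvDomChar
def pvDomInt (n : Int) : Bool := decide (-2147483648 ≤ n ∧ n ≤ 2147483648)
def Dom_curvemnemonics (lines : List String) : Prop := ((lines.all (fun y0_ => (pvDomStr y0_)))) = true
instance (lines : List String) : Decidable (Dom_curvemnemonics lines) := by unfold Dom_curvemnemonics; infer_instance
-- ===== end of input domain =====

-- B replaces A's two sectionindex scans and slicing by one pass with an in_section flag (objective: simpler).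

-- ===== PORT A =====
-- Python sectionindex: idx counts lines until the first whose strip() starts with prefix.
def sectionindex (lines : List String) (pfx : String) : Nat :=
  match lines with
  | [] => 0
  | line :: rest =>
    if PySem.Str.startswith (PySem.Str.strip line) pfx then 0
    else sectionindex rest pfx + 1

-- indices here are nonnegative, so lines[i:] = drop i and lines[i:j] = (drop i).take (j-i) exactly
def curvemnemonics (lines : List String) : List String :=
  let startidx := sectionindex lines "~C"
  let rest := lines.drop (startidx + 1)
  let endidx := sectionindex rest "~"
  (rest.take endidx).foldl
    (fun mnemonics line =>
      if PySem.Str.startswith line "#" then mnemonics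
      else mnemonics ++ [PySem.Str.strip (((PySem.Str.split? line ".").getD []).headD "")]) []

-- ===== PORT B =====
-- the in_section = True phase of B's loop: collect until a stripped "~" line
def collectB : List String → List String
  | [] => []
  | line :: rest =>
    if PySem.Str.startswith (PySem.Str.strip line) "~" then []
    else if PySem.Str.startswith line "#" then collectB rest
    else PySem.Str.strip (((PySem.Str.split? line ".").getD []).headD "") :: collectB rest

-- the in_section = False phase: scan for the "~C" header
def curvemnemonics_alt (lines : List String) : List String :=
  match lines with
  | [] => []
  | line :: rest =>
    if PySem.Str.startswith (PySem.Str.strip line) "~C" then collectB rest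
    else curvemnemonics_alt rest

-- ===== PRECONDITION & SPEC =====
def Spec_curvemnemonics (lines : List String) (out : List String) : Prop := out = curvemnemonics_alt lines
instance (lines : List String) (out : List String) : Decidable (Spec_curvemnemonics lines out) := by unfold Spec_curvemnemonics; infer_instance

-- ===== CLAIM (what is proved, stated in full; the proofs are below) =====
def Claim_equal_curvemnemonics : Prop := ∀ (lines : List String), Dom_curvemnemonics lines → Spec_curvemnemonics lines (curvemnemonics lines)

-- ===== LEMMAS AND PROOFS =====

-- A's bounded fold over the slice up to the "~" boundary equals B's collect phase
theorem foldl_take_eq_collectB (l : List String) (acc : List String) :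
    (l.take (sectionindex l "~")).foldl
      (fun mnemonics line =>
        if PySem.Str.startswith line "#" then mnemonics
        else mnemonics ++ [PySem.Str.strip (((PySem.Str.split? line ".").getD []).headD "")]) acc
      = acc ++ collectB l := by
  induction l generalizing acc with
  | nil => simp [sectionindex, collectB]
  | cons line rest ih =>
    by_cases h : PySem.Chars.startswith (PySem.Chars.strip line.toList) ['~'] = true
    · simp [sectionindex, collectB, h]
    · by_cases h2 : PySem.Chars.startswith line.toList ['#'] = true
      · simp at ih
        simp [sectionindex, collectB, h, h2, ih]
      · simp at ih
        simp [sectionindex, collectB, h, h2, ih]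

-- B's scan phase equals dropping past A's startidx
theorem alt_eq_collectB_drop (lines : List String) :
    curvemnemonics_alt lines = collectB (lines.drop (sectionindex lines "~C" + 1)) := by
  induction lines with
  | nil => simp [curvemnemonics_alt, sectionindex, collectB]
  | cons line rest ih =>
    by_cases h : PySem.Chars.startswith (PySem.Chars.strip line.toList) ['~', 'C'] = true
    · simp [curvemnemonics_alt, sectionindex, h]
    · simp [curvemnemonics_alt, sectionindex, h, ih]

-- ===== VERDICT (by name: the statement is the Claim_ definition above) =====
theorem curvemnemonics_spec : Claim_equal_curvemnemonics := by
  intro lines _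
  unfold Spec_curvemnemonics curvemnemonics
  rw [foldl_take_eq_collectB, alt_eq_collectB_drop]
  simp
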